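-- pv_equiv track=rewrite | github.com/Jeseoyun/CoyoTe | boj/S2/week5/4994/jaefan.py | find_multiple
-- ===== SOURCE A (Python) =====
-- from collections import deque
--
-- def find_multiple(N):
--
--     M = 1
--     queue = deque()
--     queue.append(M)
--     while queue:
--         M = queue.popleft()
--
--         # M 뒤에 0을 추가하는 경우
--         if int(str(M)+'0') % N == 0:
--             return int(str(M)+'0')
--         # M 뒤에 1을 추가하는 경우
--         if int(str(M)+'1') % N == 0:
--             return int(str(M)+'1')
--         queue.append(int(str(M)+'0'))
--         queue.append(int(str(M)+'1'))
--     return None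
-- ===== SOURCE B (Python) =====
-- def find_multiple(N):
--     # Counting k upward and reading k's binary digits as decimal digits yields
--     # exactly the BFS candidate order of the original, with no queue at all.
--     k = 2
--     while True:
--         x = int(bin(k)[2:])
--         if x % N == 0:
--             return x
--         k += 1
-- ===== Notes on version B (the rewrite author's own statement) =====
-- stated objective: faster
-- what changed: Replaces the deque BFS over growing big-int nodes (each popped, re-stringified and re-enqueued with two children) by a plain counter whose binary digits read as decimal give the same candidates in the same order, so the queue of all frontier numbers disappears and each candidate is built once with a single bin() call instead of repeated str()/int() round-trips.
import Mathlib
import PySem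

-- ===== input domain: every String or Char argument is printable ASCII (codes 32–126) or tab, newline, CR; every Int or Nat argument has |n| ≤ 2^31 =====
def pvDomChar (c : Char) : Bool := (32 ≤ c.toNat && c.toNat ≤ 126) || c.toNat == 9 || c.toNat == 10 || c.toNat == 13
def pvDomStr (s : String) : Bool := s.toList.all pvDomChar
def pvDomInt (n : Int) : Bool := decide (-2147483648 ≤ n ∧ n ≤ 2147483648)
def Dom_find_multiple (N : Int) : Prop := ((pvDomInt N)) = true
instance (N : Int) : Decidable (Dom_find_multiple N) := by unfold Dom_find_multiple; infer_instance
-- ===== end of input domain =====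

-- B changes the mechanism, not the answer: the BFS queue of big-int nodes is replaced by a
-- counter whose binary digits, read as decimal, yield the identical candidate sequence.

-- ===== PORT A =====
-- int(str(M)+'0') / int(str(M)+'1'): for the nonnegative ints A's queue holds, appending a
-- digit character to str(M) and re-parsing is exactly 10*M + d; ported by hand as such.
-- The unbounded 'while queue' loop carries a fuel counter j (guard only; Python has none).
def pvLoopA (N : Int) (j : Nat) (queue : List Int) : Option Int :=
  match queue with
  | [] => none
  | M :: rest =>
    if PySem.Int.mod (10 * M + 0) N == 0 then some (10 * M + 0)
    else if PySem.Int.mod (10 * M + 1) N == 0 then some (10 * M + 1)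
    else if _h : j + 1 ≤ 2 ^ 64 then
      pvLoopA N (j + 1) (rest ++ [10 * M + 0, 10 * M + 1])
    else none
termination_by 2 ^ 64 + 1 - j
decreasing_by omega

def find_multiple (N : Int) : Option Int := pvLoopA N 1 [1]

-- ===== PORT B =====
-- int(bin(k)[2:]): k's binary digits read as decimal digits (ported by hand, bit by bit).
def pvBinDec (k : Nat) : Int :=
  if k = 0 then 0 else 10 * pvBinDec (k / 2) + (k % 2)
termination_by k
decreasing_by exact Nat.div_lt_self (Nat.pos_of_ne_zero (by assumption)) (by omega)

-- the unbounded 'while True' loop carries a fuel counter (guard only; Python has none);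
-- its bound 2^65+1 covers exactly the candidates A's fuel 2^64 covers (k = 2 .. 2^65+1).
def pvLoopB (N : Int) (k : Nat) : Option Int :=
  let x := pvBinDec k
  if PySem.Int.mod x N == 0 then some x
  else if _h : k + 1 ≤ 2 ^ 65 + 1 then pvLoopB N (k + 1)
  else none
termination_by 2 ^ 65 + 2 - k
decreasing_by omega

def find_multiple_alt (N : Int) : Option Int := pvLoopB N 2

-- ===== PRECONDITION & SPEC =====
-- Python A computes '% N', so N = 0 raises ZeroDivisionError; that is all Pre_ excludes.
def Pre_find_multiple (N : Int) : Prop := N ≠ 0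
instance (N : Int) : Decidable (Pre_find_multiple N) := by unfold Pre_find_multiple; infer_instance
def pvWitness_find_multiple : Int := (6)

def Spec_find_multiple (N : Int) (out : Option Int) : Prop := out = find_multiple_alt N
instance (N : Int) (out : Option Int) : Decidable (Spec_find_multiple N out) := by unfold Spec_find_multiple; infer_instance

-- ===== CLAIM (what is proved, stated in full; the proofs are below) =====
def Claim_equal_find_multiple : Prop := ∀ (N : Int), Dom_find_multiple N → Pre_find_multiple N → Spec_find_multiple N (find_multiple N)

theorem pvBinDec_two_mul (j : Nat) (hj : 1 ≤ j) : pvBinDec (2 * j) = 10 * pvBinDec j := by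
  rw [pvBinDec]
  have h1 : 2 * j ≠ 0 := by omega
  have h2 : 2 * j / 2 = j := by omega
  simp [h1, h2]

theorem pvBinDec_two_mul_add_one (j : Nat) : pvBinDec (2 * j + 1) = 10 * pvBinDec j + 1 := by
  rw [pvBinDec]
  have h2 : (2 * j + 1) / 2 = j := by omega
  simp [h2]

-- ===== LEMMAS AND PROOFS =====

theorem pvRangeCons (j : Nat) (h : 1 ≤ j) :
    List.range' j j = j :: List.range' (j + 1) (j - 1) := by
  obtain ⟨m, rfl⟩ : ∃ m, j = m + 1 := ⟨j - 1, by omega⟩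
  simp [List.range'_succ]

theorem pvLoop_agree (N : Int) : ∀ (n j : Nat), 1 ≤ j → j ≤ 2 ^ 64 → 2 ^ 64 - j ≤ n →
    pvLoopA N j ((List.range' j j).map pvBinDec) = pvLoopB N (2 * j) := by
  intro n
  induction n with
  | zero =>
    intro j h1 h2 h3
    have hj : j = 2 ^ 64 := by omega
    subst hj
    have hcons : List.range' (2 ^ 64) (2 ^ 64) =
        2 ^ 64 :: List.range' (2 ^ 64 + 1) (2 ^ 64 - 1) := pvRangeCons (2 ^ 64) (by norm_num)
    have e0 := pvBinDec_two_mul (2 ^ 64) (by norm_num)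
    have e1 := pvBinDec_two_mul_add_one (2 ^ 64)
    rw [pvLoopB]
    rw [pvLoopB]
    rw [hcons, pvLoopA.eq_def]
    simp only [List.map_cons, add_zero, e0, e1]
    split_ifs with c1 c2 <;> try rfl
    all_goals omega
  | succ n ih =>
    intro j h1 h2 h3
    have hcons : List.range' j j = j :: List.range' (j + 1) (j - 1) := pvRangeCons j h1
    have e0 := pvBinDec_two_mul j h1
    have e1 := pvBinDec_two_mul_add_one j
    have hqueue : (List.range' (j + 1) (j - 1)).map pvBinDec ++
        [10 * pvBinDec j, 10 * pvBinDec j + 1] =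
        (List.range' (j + 1) (j + 1)).map pvBinDec := by
      have hsplit := List.range'_append (s := j + 1) (m := j - 1) (n := 2) (step := 1)
      rw [show j + 1 + 1 * (j - 1) = 2 * j from by omega, show j - 1 + 2 = j + 1 from by omega] at hsplit
      rw [← hsplit, List.map_append]
      congr 1
      rw [show List.range' (2 * j) 2 1 = [2 * j, 2 * j + 1] from by simp [List.range']]
      simp [e0, e1]
    rw [pvLoopB]
    rw [pvLoopB]
    rw [hcons, pvLoopA.eq_def]
    simp only [List.map_cons, add_zero, e0, e1]
    split_ifs with c1 c2 hg1 hg2 hg1 hg2 <;> try rfl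
    all_goals first
      | omega
      | (rw [hqueue, show 2 * j + 1 + 1 = 2 * (j + 1) from by omega]
         exact ih (j + 1) (by omega) (by omega) (by omega))

-- ===== VERDICT (by name: the statement is the Claim_ definition above) =====
theorem find_multiple_spec : Claim_equal_find_multiple := by
  intro N _ _
  unfold Spec_find_multiple find_multiple find_multiple_alt
  have h := pvLoop_agree N (2 ^ 64) 1 (by norm_num) (by norm_num) (by norm_num)
  have h1 : (List.range' 1 1).map pvBinDec = [1] := by
    simp [List.range', pvBinDec]
  rw [h1] at h
  simpa using h
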